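-- pv_equiv track=rewrite | github.com/pranjalashutosh/LegalDoc_filling_AI_Assistant | lib/placeholder_detector.py | _extract_sentence_context
-- ===== SOURCE A (Python) =====
-- from typing import Dict, List, Set
--
-- def _split_sentences_with_spans(text: str) -> List[Dict[str, int]]:
--     """
--     Split text into sentences and return list of dicts with start/end indexes and sentence text.
--     Very lightweight heuristic using punctuation . ! ? ; and line breaks.
--     """
--     if not text:
--         return []
--     spans = []
--     start = 0
--     i = 0
--     n = len(text)
--     terminators = {'.', '!', '?', ';', '\n'}
--     while i < n:
--         ch = text[i]
--         if ch in terminators: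
--             # Include the terminator
--             end = i + 1
--             sent = text[start:end].strip()
--             if sent:
--                 spans.append({'start': start, 'end': end, 'text': sent})
--             start = end
--         i += 1
--     # Tail
--     if start < n:
--         sent = text[start:n].strip()
--         if sent:
--             spans.append({'start': start, 'end': n, 'text': sent})
--     return spans
--
-- def _extract_sentence_context(paragraph_text: str, match_start: int, match_end: int) -> Dict[str, str]:
--     """
--     Extract the sentence containing the match and its immediate previous and next sentences.
--     Returns dict with keys: prev, sentence, next.
--     """
--     sentences = _split_sentences_with_spans(paragraph_text or '')
--     if not sentences:
--         t = (paragraph_text or '').strip()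
--         return {'prev': '', 'sentence': t, 'next': ''}
--     idx = 0
--     for j, span in enumerate(sentences):
--         if span['start'] <= match_start < span['end']:
--             idx = j
--             break
--     prev_text = sentences[idx - 1]['text'] if idx - 1 >= 0 else ''
--     sent_text = sentences[idx]['text']
--     next_text = sentences[idx + 1]['text'] if idx + 1 < len(sentences) else ''
--     # Clip to reasonable lengths to keep LLM payload minimal
--     def clip(s: str, max_len: int = 300) -> str:
--         return s[:max_len]
--     return {
--         'prev': clip(prev_text),
--         'sentence': clip(sent_text, 400),
--         'next': clip(next_text)
--     }
-- ===== SOURCE B (Python) =====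
-- _TERM = '.!?;\n'
--
--
-- def _seg_start(text, p):
--     """Start of the terminator-delimited segment containing position p (scan left)."""
--     s = p
--     while s > 0 and text[s - 1] not in _TERM:
--         s -= 1
--     return s
--
--
-- def _seg_end(text, p):
--     """End (terminator included) of the segment containing position p (scan right)."""
--     n = len(text)
--     e = p
--     while e < n and text[e] not in _TERM:
--         e += 1
--     return e + 1 if e < n else e
--
--
-- def _scan_forward(text, e):
--     """First non-whitespace sentence at or after boundary e: (stripped text, its end); ('', n) if none."""
--     n = len(text)
--     while e < n:
--         s = e
--         e = _seg_end(text, e)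
--         t = text[s:e].strip()
--         if t:
--             return t, e
--     return '', n
--
--
-- def _scan_back(text, s):
--     """Nearest non-whitespace sentence ending at or before boundary s, stripped; '' if none."""
--     while s > 0:
--         s2 = _seg_start(text, s - 1)
--         t = text[s2:s].strip()
--         if t:
--             return t
--         s = s2
--     return ''
--
--
-- def _extract_sentence_context(paragraph_text, match_start, match_end):
--     text = paragraph_text or ''
--     n = len(text)
--     if 0 <= match_start < n:
--         a = _seg_start(text, match_start)
--         e = _seg_end(text, match_start)
--         cur = text[a:e].strip()
--         if cur:
--             return {'prev': _scan_back(text, a)[:300],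
--                     'sentence': cur[:400],
--                     'next': _scan_forward(text, e)[0][:300]}
--     # match position lies in no sentence: default to the first sentence, if any
--     first, e1 = _scan_forward(text, 0)
--     if not first:
--         return {'prev': '', 'sentence': text.strip(), 'next': ''}
--     return {'prev': '', 'sentence': first[:400], 'next': _scan_forward(text, e1)[0][:300]}
-- ===== Notes on version B (the rewrite author's own statement) =====
-- stated objective: alternative
-- what changed: B never builds A's global list of sentence spans: it locates the sentence containing match_start by scanning left and right from that position to the enclosing terminators, and finds the previous/next non-empty sentences by local backward/forward segment scans (with a forward scan from 0 for the no-containing-sentence fallback), replacing A's split-everything-then-linear-index-search.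
import Mathlib
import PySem

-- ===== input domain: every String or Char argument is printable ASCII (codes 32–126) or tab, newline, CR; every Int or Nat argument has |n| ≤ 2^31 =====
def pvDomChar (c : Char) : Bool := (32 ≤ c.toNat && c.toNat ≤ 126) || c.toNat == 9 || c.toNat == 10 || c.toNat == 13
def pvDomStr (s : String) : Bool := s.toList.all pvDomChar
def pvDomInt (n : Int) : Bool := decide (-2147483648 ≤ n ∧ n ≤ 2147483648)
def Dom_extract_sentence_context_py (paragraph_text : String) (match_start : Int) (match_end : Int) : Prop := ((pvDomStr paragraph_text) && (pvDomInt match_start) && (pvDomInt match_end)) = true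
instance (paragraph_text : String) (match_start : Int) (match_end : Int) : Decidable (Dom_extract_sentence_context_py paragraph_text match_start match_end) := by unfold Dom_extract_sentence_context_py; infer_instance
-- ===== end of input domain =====

-- B drops A's global sentence-list construction: it scans left/right from match_start to the
-- enclosing terminators and finds neighbours by local backward/forward segment scans; objective: alternative.

-- ===== PORT A =====
-- terminator set {'.', '!', '?', ';', '\n'}
def pvTerm (c : Char) : Bool := c == '.' || c == '!' || c == '?' || c == ';' || c == '\n'

-- the 'while i < n' loop of _split_sentences_with_spans; state = (start, spans)
def pvWhileA (cs : List Char) : List Char → Nat → Nat → List (Nat × Nat × List Char) → Nat × List (Nat × Nat × List Char)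
  | [], _, start, spans => (start, spans)
  | ch :: rest, i, start, spans =>
    if pvTerm ch then
      -- sent = text[start:i+1].strip() ; slice with natural in-range bounds = drop/take
      let sent := PySem.Chars.strip ((cs.drop start).take (i + 1 - start))
      pvWhileA cs rest (i + 1) (i + 1) (if sent = [] then spans else spans ++ [(start, i + 1, sent)])
    else pvWhileA cs rest (i + 1) start spans

def pvSplitA (cs : List Char) : List (Nat × Nat × List Char) :=
  if cs = [] then []
  else
    let n := cs.length
    let st := pvWhileA cs cs 0 0 []
    if st.1 < n then
      let sent := PySem.Chars.strip ((cs.drop st.1).take (n - st.1))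
      if sent = [] then st.2 else st.2 ++ [(st.1, n, sent)]
    else st.2

-- 'for j, span in enumerate(sentences): if …: idx = j; break' with idx initialised to 0
def pvFindA (ms : Int) : Nat → List (Nat × Nat × List Char) → Nat
  | _, [] => 0
  | j, s :: rest => if (s.1 : Int) ≤ ms ∧ ms < (s.2.1 : Int) then j else pvFindA ms (j + 1) rest

def extract_sentence_context_py (paragraph_text : String) (match_start : Int) (match_end : Int) : List (String × String) :=
  let cs := paragraph_text.toList
  let sentences := pvSplitA cs
  if sentences = [] then
    [("prev", ""), ("sentence", String.mk (PySem.Chars.strip cs)), ("next", "")]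
  else
    let idx := pvFindA match_start 0 sentences
    let prevT := if 1 ≤ idx then ((sentences[idx - 1]?).map (·.2.2)).getD [] else []
    let sentT := ((sentences[idx]?).map (·.2.2)).getD []
    let nextT := if idx + 1 < sentences.length then ((sentences[idx + 1]?).map (·.2.2)).getD [] else []
    [("prev", String.mk (prevT.take 300)), ("sentence", String.mk (sentT.take 400)), ("next", String.mk (nextT.take 300))]

-- ===== PORT B =====
-- text[j] for an in-range j (every port access is guarded by j's range)
def pvTermAt (cs : List Char) (j : Nat) : Bool := pvTerm (cs.getD j ' ')

-- _seg_start: 'while s > 0 and text[s-1] not in _TERM: s -= 1'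
def pvSegStart (cs : List Char) : Nat → Nat
  | 0 => 0
  | s + 1 => if pvTermAt cs s then s + 1 else pvSegStart cs s

-- termination helper for pvScanBack (cited by its decreasing_by)
theorem pvSegStart_le (cs : List Char) : ∀ s, pvSegStart cs s ≤ s := by
  intro s
  induction s with
  | zero => simp [pvSegStart]
  | succ k ih => simp only [pvSegStart]; split <;> omega

-- the 'while e < n and text[e] not in _TERM' loop of _seg_end
def pvSegEndLoop (cs : List Char) (n : Nat) (e : Nat) : Nat :=
  if h : e < n then (if pvTermAt cs e then e else pvSegEndLoop cs n (e + 1)) else e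
termination_by n - e
decreasing_by omega

-- _seg_end: '… ; return e + 1 if e < n else e'
def pvSegEnd (cs : List Char) (n : Nat) (p : Nat) : Nat :=
  let e := pvSegEndLoop cs n p
  if e < n then e + 1 else e

-- termination helpers for pvScanF (cited by its decreasing_by)
theorem pvSegEndLoop_ge (cs : List Char) (n : Nat) : ∀ e, e ≤ pvSegEndLoop cs n e := by
  intro e
  fun_induction pvSegEndLoop cs n e <;> omega

theorem pvSegEnd_gt (cs : List Char) (n p : Nat) (h : p < n) : p < pvSegEnd cs n p := by
  have hge := pvSegEndLoop_ge cs n p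
  unfold pvSegEnd
  dsimp only
  split <;> omega

-- _scan_forward: 'while e < n: s = e; e = _seg_end(text, e); t = text[s:e].strip(); if t: return t, e / return "", n'
def pvScanF (cs : List Char) (n : Nat) (e : Nat) : List Char × Nat :=
  if h : e < n then
    let e2 := pvSegEnd cs n e
    let t := PySem.Chars.strip ((cs.drop e).take (e2 - e))
    if t ≠ [] then (t, e2) else pvScanF cs n e2
  else ([], n)
termination_by n - e
decreasing_by have := pvSegEnd_gt cs n e h; omega

-- _scan_back: 'while s > 0: s2 = _seg_start(text, s-1); t = text[s2:s].strip(); if t: return t; s = s2 / return ""'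
def pvScanBack (cs : List Char) (s : Nat) : List Char :=
  match s with
  | 0 => []
  | k + 1 =>
    let s2 := pvSegStart cs k
    let t := PySem.Chars.strip ((cs.drop s2).take (k + 1 - s2))
    if t ≠ [] then t else pvScanBack cs s2
termination_by s
decreasing_by have := pvSegStart_le cs k; omega

-- the shared fall-through tail of _extract_sentence_context (first sentence, if any, as default)
def pvFallbackB (cs : List Char) (n : Nat) : List (String × String) :=
  let r := pvScanF cs n 0
  if r.1 = [] then
    [("prev", ""), ("sentence", String.mk (PySem.Chars.strip cs)), ("next", "")]
  else
    [("prev", ""), ("sentence", String.mk (r.1.take 400)),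
     ("next", String.mk ((pvScanF cs n r.2).1.take 300))]

def extract_sentence_context_py_alt (paragraph_text : String) (match_start : Int) (match_end : Int) : List (String × String) :=
  let cs := paragraph_text.toList
  let n := cs.length
  if 0 ≤ match_start ∧ match_start < (n : Int) then
    let p := match_start.toNat
    let a := pvSegStart cs p
    let e := pvSegEnd cs n p
    let cur := PySem.Chars.strip ((cs.drop a).take (e - a))
    if cur ≠ [] then
      [("prev", String.mk ((pvScanBack cs a).take 300)),
       ("sentence", String.mk (cur.take 400)),
       ("next", String.mk ((pvScanF cs n e).1.take 300))]
    else pvFallbackB cs n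
  else pvFallbackB cs n

-- ===== PRECONDITION & SPEC =====
def Spec_extract_sentence_context_py (paragraph_text : String) (match_start : Int) (match_end : Int) (out : List (String × String)) : Prop := out = extract_sentence_context_py_alt paragraph_text match_start match_end
instance (paragraph_text : String) (match_start : Int) (match_end : Int) (out : List (String × String)) : Decidable (Spec_extract_sentence_context_py paragraph_text match_start match_end out) := by unfold Spec_extract_sentence_context_py; infer_instance

-- ===== CLAIM (what is proved, stated in full; the proofs are below) =====
def Claim_equal_extract_sentence_context_py : Prop := ∀ (paragraph_text : String) (match_start : Int) (match_end : Int), Dom_extract_sentence_context_py paragraph_text match_start match_end → Spec_extract_sentence_context_py paragraph_text match_start match_end (extract_sentence_context_py paragraph_text match_start match_end)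

-- ===== LEMMAS AND PROOFS =====

-- reference: the list of non-whitespace sentence spans from boundary e on, using B's forward step
def spansFrom (cs : List Char) (e : Nat) : List (Nat × Nat × List Char) :=
  if h : e < cs.length then
    let e2 := pvSegEnd cs cs.length e
    let t := PySem.Chars.strip ((cs.drop e).take (e2 - e))
    if t = [] then spansFrom cs e2 else (e, e2, t) :: spansFrom cs e2
  else []
termination_by cs.length - e
decreasing_by all_goals (have := pvSegEnd_gt cs cs.length e h; omega)

theorem pvSegEndLoop_le (cs : List Char) (n : Nat) : ∀ e, e ≤ n → pvSegEndLoop cs n e ≤ n := by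
  intro e
  fun_induction pvSegEndLoop cs n e with
  | case1 e h ht => intro _; omega
  | case2 e h ht ih => intro _; exact ih (by omega)
  | case3 e h => intro hle; omega

theorem pvSegEnd_le (cs : List Char) (n e : Nat) (h : e ≤ n) : pvSegEnd cs n e ≤ n := by
  have := pvSegEndLoop_le cs n e h
  unfold pvSegEnd; dsimp only; split <;> omega

theorem pvSegEndLoop_congr (cs : List Char) (n : Nat) : ∀ (d a p : Nat), p - a = d → a ≤ p → p ≤ n →
    (∀ j, a ≤ j → j < p → pvTermAt cs j = false) → pvSegEndLoop cs n a = pvSegEndLoop cs n p := by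
  intro d
  induction d with
  | zero =>
    intro a p hd hle h1 h2
    obtain rfl : a = p := by omega
    rfl
  | succ k ih =>
    intro a p hd hle hpn hnt
    have ha : a < p := by omega
    have han : a < n := by omega
    have hta : pvTermAt cs a = false := hnt a le_rfl ha
    have hstep : pvSegEndLoop cs n a = pvSegEndLoop cs n (a + 1) := by
      conv_lhs => rw [pvSegEndLoop]
      simp [han, hta]
    rw [hstep]
    exact ih (a + 1) p (by omega) (by omega) hpn (fun j h1 h2 => hnt j (by omega) h2)

theorem pvSegStart_bd (cs : List Char) : ∀ p, pvSegStart cs p = 0 ∨ (0 < pvSegStart cs p ∧ pvTermAt cs (pvSegStart cs p - 1) = true) := by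
  intro p
  induction p with
  | zero => left; rfl
  | succ k ih =>
    simp only [pvSegStart]
    by_cases ht : pvTermAt cs k = true
    · right; simp [ht]
    · simpa [ht] using ih

theorem pvSegStart_noterm (cs : List Char) : ∀ p j, pvSegStart cs p ≤ j → j < p → pvTermAt cs j = false := by
  intro p
  induction p with
  | zero => intro j h1 h2; omega
  | succ k ih =>
    intro j h1 h2
    by_cases ht : pvTermAt cs k = true
    · simp only [pvSegStart, ht, if_pos] at h1; omega
    · simp only [pvSegStart, ht] at h1
      by_cases hj : j = k
      · subst hj; simpa using ht
      · exact ih j (by simpa [ht] using h1) (by omega)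

-- elements of spansFrom: ordered, inside [e, n), with non-empty text
theorem spansFrom_inv (cs : List Char) : ∀ e x, x ∈ spansFrom cs e → e ≤ x.1 ∧ x.1 < x.2.1 ∧ x.2.1 ≤ cs.length ∧ x.2.2 ≠ [] := by
  intro e
  fun_induction spansFrom cs e with
  | case1 e h e2 t ht ih =>
    intro x hx
    have hgt := pvSegEnd_gt cs cs.length e h
    have := ih x hx
    exact ⟨by omega, this.2.1, this.2.2⟩
  | case2 e h e2 t ht ih =>
    intro x hx
    have hgt := pvSegEnd_gt cs cs.length e h
    have hle := pvSegEnd_le cs cs.length e (by omega)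
    rcases List.mem_cons.mp hx with hx | hx
    · subst hx; exact ⟨le_rfl, hgt, hle, ht⟩
    · have := ih x hx
      exact ⟨by omega, this.2.1, this.2.2⟩
  | case3 e h => intro x hx; simp at hx

theorem scanF_eq (cs : List Char) : ∀ e, pvScanF cs cs.length e =
    (match spansFrom cs e with | [] => ([], cs.length) | (_, b, t) :: _ => (t, b)) := by
  intro e
  fun_induction pvScanF cs cs.length e with
  | case1 e h e2 t ht =>
    have ht' : PySem.Chars.strip (List.take (pvSegEnd cs cs.length e - e) (List.drop e cs)) ≠ [] := ht
    have hsf : spansFrom cs e = (e, e2, t) :: spansFrom cs e2 := by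
      rw [spansFrom]; simp [h, ht']; exact ⟨⟨rfl, rfl⟩, rfl⟩
    rw [hsf]
  | case2 e h e2 t ht ih =>
    have ht' : PySem.Chars.strip (List.take (pvSegEnd cs cs.length e - e) (List.drop e cs)) = [] := by
      simpa using ht
    have hsf : spansFrom cs e = spansFrom cs e2 := by
      rw [spansFrom]; simp [h, ht']; rfl
    rw [hsf, ih]
  | case3 e h =>
    have hsf : spansFrom cs e = [] := by rw [spansFrom]; simp [h]
    rw [hsf]

theorem scanF_tail (cs : List Char) : ∀ e a b t rest, spansFrom cs e = (a, b, t) :: rest → spansFrom cs b = rest := by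
  intro e
  fun_induction spansFrom cs e with
  | case1 e h e2 t ht ih => exact ih
  | case2 e h e2 t ht ih =>
    intro a b t' rest heq
    injection heq with h1 h2
    injection h1 with ha hbt
    injection hbt with hb htx
    subst hb; subst h2; rfl
  | case3 e h => intro a b t rest heq; simp at heq

-- boundary decomposition: the whole span list splits at a sentence boundary s, and pvScanBack
-- returns the text of the last span before s
theorem decomp (cs : List Char) : ∀ s, s ≤ cs.length → (s = 0 ∨ (0 < s ∧ pvTermAt cs (s - 1) = true)) →
    ∃ P, spansFrom cs 0 = P ++ spansFrom cs s ∧ (∀ x ∈ P, x.2.1 ≤ s) ∧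
      pvScanBack cs s = ((P.getLast?).map (fun x => x.2.2)).getD [] := by
  intro s
  induction s using Nat.strong_induction_on with
  | _ s ih =>
    intro hsn hbd
    cases s with
    | zero => exact ⟨[], by simp, by simp, by simp [pvScanBack]⟩
    | succ k =>
      have htk : pvTermAt cs k = true := by
        rcases hbd with h | h
        · omega
        · simpa using h.2
      have hkn : k < cs.length := by omega
      have hs2k : pvSegStart cs k ≤ k := pvSegStart_le cs k
      obtain ⟨P2, hsp2, hbd2, hsb2⟩ := ih (pvSegStart cs k) (by omega) (by omega) (pvSegStart_bd cs k)
      have hloopk : pvSegEndLoop cs cs.length k = k := by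
        rw [pvSegEndLoop]; simp [hkn, htk]
      have hloop : pvSegEndLoop cs cs.length (pvSegStart cs k) = k := by
        rw [pvSegEndLoop_congr cs cs.length (k - pvSegStart cs k) (pvSegStart cs k) k rfl hs2k (by omega)
          (fun j h1 h2 => pvSegStart_noterm cs k j h1 h2)]
        exact hloopk
      have hend : pvSegEnd cs cs.length (pvSegStart cs k) = k + 1 := by
        unfold pvSegEnd; simp [hloop, hkn]
      have hsfs2 : spansFrom cs (pvSegStart cs k) =
          (if PySem.Chars.strip ((cs.drop (pvSegStart cs k)).take (k + 1 - pvSegStart cs k)) = []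
           then spansFrom cs (k + 1)
           else (pvSegStart cs k, k + 1, PySem.Chars.strip ((cs.drop (pvSegStart cs k)).take (k + 1 - pvSegStart cs k))) :: spansFrom cs (k + 1)) := by
        rw [spansFrom]
        simp [show pvSegStart cs k < cs.length by omega, hend]
      have hscb : pvScanBack cs (k + 1) =
          (if PySem.Chars.strip ((cs.drop (pvSegStart cs k)).take (k + 1 - pvSegStart cs k)) ≠ []
           then PySem.Chars.strip ((cs.drop (pvSegStart cs k)).take (k + 1 - pvSegStart cs k))
           else pvScanBack cs (pvSegStart cs k)) := by
        rw [pvScanBack]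
      by_cases ht : PySem.Chars.strip ((cs.drop (pvSegStart cs k)).take (k + 1 - pvSegStart cs k)) = []
      · refine ⟨P2, ?_, ?_, ?_⟩
        · rw [hsp2, hsfs2, if_pos ht]
        · intro x hx; exact le_trans (hbd2 x hx) (by omega)
        · rw [hscb]; simp [ht]; exact hsb2
      · refine ⟨P2 ++ [(pvSegStart cs k, k + 1, PySem.Chars.strip ((cs.drop (pvSegStart cs k)).take (k + 1 - pvSegStart cs k)))], ?_, ?_, ?_⟩
        · rw [hsp2, hsfs2, if_neg ht, List.append_assoc]; rfl
        · intro x hx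
          rcases List.mem_append.mp hx with h | h
          · exact le_trans (hbd2 x h) (by omega)
          · simp at h; subst h; simp
        · rw [hscb, if_pos ht]; simp

-- A's tail handling after the while loop
def afterA (cs : List Char) (st : Nat × List (Nat × Nat × List Char)) : List (Nat × Nat × List Char) :=
  if st.1 < cs.length then
    let sent := PySem.Chars.strip ((cs.drop st.1).take (cs.length - st.1))
    if sent = [] then st.2 else st.2 ++ [(st.1, cs.length, sent)]
  else st.2

theorem whileA_eq (cs : List Char) : ∀ (rest : List Char) (i start : Nat) (spans : List (Nat × Nat × List Char)),
    rest = cs.drop i → start ≤ i → i ≤ cs.length →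
    (∀ j, start ≤ j → j < i → pvTermAt cs j = false) →
    afterA cs (pvWhileA cs rest i start spans) = spans ++ spansFrom cs start := by
  intro rest
  induction rest with
  | nil =>
    intro i start spans hdrop hsi hin hnt
    have hlen : cs.length - i = 0 := by
      have := congrArg List.length hdrop; simpa using this.symm
    have hie : i = cs.length := by omega
    subst hie
    simp only [pvWhileA]
    by_cases hs : start < cs.length
    · have hloop : pvSegEndLoop cs cs.length start = cs.length := by
        rw [pvSegEndLoop_congr cs cs.length (cs.length - start) start cs.length rfl (by omega) le_rfl hnt]
        rw [pvSegEndLoop]; simp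
      have hend : pvSegEnd cs cs.length start = cs.length := by
        unfold pvSegEnd; simp [hloop]
      have hnil : spansFrom cs cs.length = [] := by rw [spansFrom]; simp
      have hsf : spansFrom cs start =
          (if PySem.Chars.strip ((cs.drop start).take (cs.length - start)) = [] then []
           else [(start, cs.length, PySem.Chars.strip ((cs.drop start).take (cs.length - start)))]) := by
        rw [spansFrom]; simp [hs, hend, hnil]
      unfold afterA
      simp only [hs, if_pos, hsf]
      by_cases hsent : PySem.Chars.strip ((cs.drop start).take (cs.length - start)) = [] <;>
        simp [hsent]
    · have hse : start = cs.length := by omega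
      subst hse
      have hnil : spansFrom cs cs.length = [] := by rw [spansFrom]; simp
      unfold afterA
      simp [hnil]
  | cons ch rest' ihr =>
    intro i start spans hdrop hsi hin hnt
    have hi : i < cs.length := by
      have := congrArg List.length hdrop; simp at this; omega
    have hch : cs.getD i ' ' = ch := by
      have h0 : (cs.drop i).head? = some ch := by rw [← hdrop]; rfl
      rw [List.head?_drop] at h0
      simp [List.getD, h0]
    have hterm : pvTermAt cs i = pvTerm ch := by unfold pvTermAt; rw [hch]
    have hdrop' : rest' = cs.drop (i + 1) := by
      have : cs.drop (i + 1) = (cs.drop i).tail := by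
        rw [List.tail_drop]
      rw [this, ← hdrop]; rfl
    simp only [pvWhileA]
    by_cases htm : pvTerm ch = true
    · rw [if_pos htm]
      rw [ihr (i + 1) (i + 1) _ hdrop' le_rfl (by omega) (fun j h1 h2 => by omega)]
      have hloop : pvSegEndLoop cs cs.length start = i := by
        rw [pvSegEndLoop_congr cs cs.length (i - start) start i rfl hsi (by omega) hnt]
        rw [pvSegEndLoop]; simp [hi, hterm, htm]
      have hend : pvSegEnd cs cs.length start = i + 1 := by
        unfold pvSegEnd; simp [hloop, hi]
      have hsf : spansFrom cs start =
          (if PySem.Chars.strip ((cs.drop start).take (i + 1 - start)) = [] then spansFrom cs (i + 1)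
           else (start, i + 1, PySem.Chars.strip ((cs.drop start).take (i + 1 - start))) :: spansFrom cs (i + 1)) := by
        rw [spansFrom]
        simp [show start < cs.length by omega, hend]
      rw [hsf]
      by_cases hsent : PySem.Chars.strip ((cs.drop start).take (i + 1 - start)) = []
      · simp [hsent]
      · simp [hsent]
    · rw [if_neg htm]
      refine ihr (i + 1) start spans hdrop' (by omega) (by omega) (fun j h1 h2 => ?_)
      by_cases hj : j = i
      · subst hj; simpa [hterm] using htm
      · exact hnt j h1 (by omega)

-- A's split equals the reference
theorem splitA_eq (cs : List Char) : pvSplitA cs = spansFrom cs 0 := by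
  by_cases hcs : cs = []
  · subst hcs; rw [spansFrom]; simp [pvSplitA]
  · have h := whileA_eq cs cs 0 0 [] (by simp) le_rfl (by omega) (by omega)
    unfold afterA at h
    unfold pvSplitA
    rw [if_neg hcs]
    simpa using h

-- A's search loop with break and default 0 is findIdx?+getD
theorem pvFindA_eq (ms : Int) : ∀ (l : List (Nat × Nat × List Char)) (j : Nat),
    pvFindA ms j l = (match l.findIdx? (fun s => decide ((s.1 : Int) ≤ ms) && decide (ms < (s.2.1 : Int))) with
      | some k => j + k | none => 0) := by
  intro l
  induction l with
  | nil => intro j; simp [pvFindA]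
  | cons s rest ih =>
    intro j
    by_cases h : (s.1 : Int) ≤ ms ∧ ms < (s.2.1 : Int)
    · simp [pvFindA, h, List.findIdx?_cons]
    · have hb : (decide ((s.1 : Int) ≤ ms) && decide (ms < (s.2.1 : Int))) = false := by
        rcases not_and_or.mp h with h' | h' <;> simp [h']
      simp only [pvFindA, if_neg h, ih, List.findIdx?_cons, hb, Bool.false_eq_true, if_false]
      cases rest.findIdx? (fun s => decide ((s.1 : Int) ≤ ms) && decide (ms < (s.2.1 : Int))) with
      | none => simp
      | some k => simp [Nat.add_assoc, Nat.add_comm 1 k]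

theorem pvFindA_zero (ms : Int) (l : List (Nat × Nat × List Char)) :
    pvFindA ms 0 l = (l.findIdx? (fun s => decide ((s.1 : Int) ≤ ms) && decide (ms < (s.2.1 : Int)))).getD 0 := by
  rw [pvFindA_eq]
  cases l.findIdx? (fun s => decide ((s.1 : Int) ≤ ms) && decide (ms < (s.2.1 : Int))) <;> simp

-- the two programs agree whenever A's index search falls back to 0
theorem fallback_eq (cs : List Char) (ms : Int)
    (hnone : (spansFrom cs 0).findIdx? (fun s => decide ((s.1 : Int) ≤ ms) && decide (ms < (s.2.1 : Int))) = none) :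
    (if spansFrom cs 0 = [] then
      [("prev", ""), ("sentence", String.mk (PySem.Chars.strip cs)), ("next", "")]
    else
      [("prev", String.mk ((if 1 ≤ pvFindA ms 0 (spansFrom cs 0) then (((spansFrom cs 0)[pvFindA ms 0 (spansFrom cs 0) - 1]?).map (·.2.2)).getD [] else []).take 300)),
       ("sentence", String.mk (((((spansFrom cs 0)[pvFindA ms 0 (spansFrom cs 0)]?).map (·.2.2)).getD []).take 400)),
       ("next", String.mk ((if pvFindA ms 0 (spansFrom cs 0) + 1 < (spansFrom cs 0).length then (((spansFrom cs 0)[pvFindA ms 0 (spansFrom cs 0) + 1]?).map (·.2.2)).getD [] else []).take 300))]) =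
    pvFallbackB cs cs.length := by
  have hidx : pvFindA ms 0 (spansFrom cs 0) = 0 := by rw [pvFindA_zero, hnone]; rfl
  rw [hidx]
  unfold pvFallbackB
  rw [scanF_eq cs 0]
  cases hsp : spansFrom cs 0 with
  | nil => simp
  | cons x rest =>
    obtain ⟨a, b, t⟩ := x
    have htne : t ≠ [] := (spansFrom_inv cs 0 (a, b, t) (by rw [hsp]; exact List.mem_cons_self)).2.2.2
    have hrest : spansFrom cs b = rest := scanF_tail cs 0 a b t rest hsp
    cases rest with
    | nil => simp [htne, scanF_eq cs b, hrest]; decide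
    | cons y rest2 => simp [htne, scanF_eq cs b, hrest]; decide

theorem main_eq (paragraph_text : String) (ms me : Int) :
    extract_sentence_context_py paragraph_text ms me = extract_sentence_context_py_alt paragraph_text ms me := by
  simp only [extract_sentence_context_py, extract_sentence_context_py_alt]
  rw [splitA_eq]
  by_cases hg : 0 ≤ ms ∧ ms < ((paragraph_text.toList.length : Int))
  · rw [if_pos hg]
    set cs := paragraph_text.toList with hcs
    set p := ms.toNat with hp
    have hms : (p : Int) = ms := Int.toNat_of_nonneg hg.1
    have hpn : p < cs.length := by omega
    set a := pvSegStart cs p with ha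
    have hap : a ≤ p := pvSegStart_le cs p
    have han : a < cs.length := by omega
    set e := pvSegEnd cs cs.length p with he
    have haend : pvSegEnd cs cs.length a = e := by
      rw [he]
      unfold pvSegEnd
      rw [pvSegEndLoop_congr cs cs.length (p - a) a p rfl hap (by omega)
        (fun j h1 h2 => pvSegStart_noterm cs p j h1 h2)]
    have hpe : p < e := by rw [he]; exact pvSegEnd_gt cs cs.length p hpn
    have hen : e ≤ cs.length := by rw [he]; exact pvSegEnd_le cs cs.length p (by omega)
    obtain ⟨P, hsp, hPbd, hback⟩ := decomp cs a (by omega) (pvSegStart_bd cs p)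
    set cur := PySem.Chars.strip ((cs.drop a).take (e - a)) with hcur
    have hsfa : spansFrom cs a = (if cur = [] then spansFrom cs e else (a, e, cur) :: spansFrom cs e) := by
      rw [spansFrom, dif_pos han, haend]
    by_cases hc : cur = []
    · rw [if_neg (by simpa using hc : ¬ cur ≠ [])]
      have hsp' : spansFrom cs 0 = P ++ spansFrom cs e := by rw [hsp, hsfa, if_pos hc]
      have hnone : (spansFrom cs 0).findIdx? (fun s => decide ((s.1 : Int) ≤ ms) && decide (ms < (s.2.1 : Int))) = none := by
        rw [List.findIdx?_eq_none_iff]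
        intro x hx
        rw [hsp'] at hx
        rcases List.mem_append.mp hx with hx | hx
        · have hb := hPbd x hx
          have : ¬ (ms < (x.2.1 : Int)) := by omega
          simp [this]
        · have hb := (spansFrom_inv cs e x hx).1
          have : ¬ ((x.1 : Int) ≤ ms) := by omega
          simp [this]
      exact fallback_eq cs ms hnone
    · rw [if_pos hc]
      have hspc : spansFrom cs 0 = P ++ (a, e, cur) :: spansFrom cs e := by
        rw [hsp, hsfa, if_neg hc]
      have hne : spansFrom cs 0 ≠ [] := by rw [hspc]; simp
      rw [if_neg hne]
      have hfind : (spansFrom cs 0).findIdx? (fun s => decide ((s.1 : Int) ≤ ms) && decide (ms < (s.2.1 : Int))) = some P.length := by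
        rw [hspc, List.findIdx?_append]
        have h1 : P.findIdx? (fun s => decide ((s.1 : Int) ≤ ms) && decide (ms < (s.2.1 : Int))) = none := by
          rw [List.findIdx?_eq_none_iff]
          intro x hx
          have hb := hPbd x hx
          have : ¬ (ms < (x.2.1 : Int)) := by omega
          simp [this]
        have h2 : (decide ((a : Int) ≤ ms) && decide (ms < (e : Int))) = true := by
          simp only [Bool.and_eq_true, decide_eq_true_eq]
          omega
        rw [h1, List.findIdx?_cons]
        simp [h2]
      have hidx : pvFindA ms 0 (spansFrom cs 0) = P.length := by
        rw [pvFindA_zero, hfind]; rfl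
      rw [hidx]
      have hprev : (if 1 ≤ P.length then (((spansFrom cs 0)[P.length - 1]?).map (·.2.2)).getD [] else []) = pvScanBack cs a := by
        by_cases hP : P = []
        · rw [hback, hP]; simp
        · have h1 : 1 ≤ P.length := by
            cases P with
            | nil => exact absurd rfl hP
            | cons q P' => simp
          rw [if_pos h1, hback, hspc,
            List.getElem?_append_left (by omega : P.length - 1 < P.length),
            ← List.getLast?_eq_getElem?]
      have hsent : ((((spansFrom cs 0)[P.length]?).map (·.2.2)).getD []) = cur := by
        rw [hspc, List.getElem?_append_right le_rfl]
        simp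
      have hnext : (if P.length + 1 < (spansFrom cs 0).length then (((spansFrom cs 0)[P.length + 1]?).map (·.2.2)).getD [] else []) = (pvScanF cs cs.length e).1 := by
        rw [scanF_eq cs e]
        cases hre : spansFrom cs e with
        | nil =>
          have hn : ¬ (P.length + 1 < (spansFrom cs 0).length) := by
            rw [hspc, hre]; simp
          rw [if_neg hn]
        | cons y rest =>
          have hlt : P.length + 1 < (spansFrom cs 0).length := by
            rw [hspc, hre]; simp [List.length_append]
          rw [if_pos hlt, hspc, hre,
            List.getElem?_append_right (by omega : P.length ≤ P.length + 1)]
          simp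
      rw [hprev, hsent, hnext]
  · rw [if_neg hg]
    set cs := paragraph_text.toList with hcs
    have hnone : (spansFrom cs 0).findIdx? (fun s => decide ((s.1 : Int) ≤ ms) && decide (ms < (s.2.1 : Int))) = none := by
      rw [List.findIdx?_eq_none_iff]
      intro x hx
      have hinv := spansFrom_inv cs 0 x hx
      rcases not_and_or.mp hg with h | h
      · have : ¬ ((x.1 : Int) ≤ ms) := by omega
        simp [this]
      · have hxe : x.2.1 ≤ cs.length := hinv.2.2.1
        have : ¬ (ms < (x.2.1 : Int)) := by
          simp only [not_lt] at h ⊢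
          calc (x.2.1 : Int) ≤ (cs.length : Int) := by exact_mod_cast hxe
            _ ≤ ms := h
        simp [this]
    exact fallback_eq cs ms hnone

-- ===== VERDICT (by name: the statement is the Claim_ definition above) =====
theorem extract_sentence_context_py_spec : Claim_equal_extract_sentence_context_py := by
  intro paragraph_text match_start match_end _
  unfold Spec_extract_sentence_context_py
  exact main_eq paragraph_text match_start match_end
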